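-- pv_equiv track=rewrite | github.com/deysantanu84/python-portfolio | problemSolving/heaps/mishaAndCandies.py | solve
-- ===== SOURCE A (Python) =====
-- from heapq import heapify, heappop, heapreplace
--
-- def solve(A, B):
--     heapify(A)
--     result = 0
--
--     while len(A) > 1:
--         curr = heappop(A)
--         if curr > B:
--             break
--
--         if curr == 1:
--             x = 0
--             y = 1
--         else:
--             x = curr // 2
--             y = curr - x
--
--         result += x
--         z = A[0] + y
--         heapreplace(A, z)
--
--     if A[0] <= B:
--         result += (A[0]//2)
--
--     return result
-- ===== SOURCE B (Python) =====
-- def solve(A, B):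
--     # Sort once; never move the original elements again: a pointer i walks the
--     # sorted input while merged values live in a small side list 'ms' (kept
--     # ascending). The minimum is always min(xs[i], ms[0]).  A's break + post-loop
--     # check collapse into unified in-loop returns (after a break the remaining
--     # minimum exceeds B, so A's final check can never fire), and the curr == 1
--     # special case is redundant (1 // 2 == 0).  Does not mutate A.
--     xs = sorted(A)
--     n = len(xs)
--     i = 0
--     ms = []
--     acc = 0
--
--     def pop_min():
--         nonlocal i
--         if ms and (i >= n or ms[0] <= xs[i]):
--             return ms.pop(0)
--         v = xs[i]
--         i += 1
--         return v
--
--     while True: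
--         curr = pop_min()
--         if curr > B:
--             return acc
--         acc += curr // 2
--         if i >= n and not ms:
--             return acc
--         m = pop_min()
--         z = m + curr - curr // 2
--         j = 0
--         while j < len(ms) and ms[j] < z:
--             j += 1
--         ms.insert(j, z)
-- ===== Notes on version B (the rewrite author's own statement) =====
-- stated objective: alternative
-- what changed: Instead of maintaining one mutable heap, B sorts the input once and walks it with a pointer, keeping only the merged values in a small ascending side list (minimum = compare the two heads); A's break and post-loop check collapse into unified in-loop returns (after a break the remaining minimum already exceeds B) and the redundant curr == 1 special case disappears (1 // 2 == 0).
import Mathlib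
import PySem

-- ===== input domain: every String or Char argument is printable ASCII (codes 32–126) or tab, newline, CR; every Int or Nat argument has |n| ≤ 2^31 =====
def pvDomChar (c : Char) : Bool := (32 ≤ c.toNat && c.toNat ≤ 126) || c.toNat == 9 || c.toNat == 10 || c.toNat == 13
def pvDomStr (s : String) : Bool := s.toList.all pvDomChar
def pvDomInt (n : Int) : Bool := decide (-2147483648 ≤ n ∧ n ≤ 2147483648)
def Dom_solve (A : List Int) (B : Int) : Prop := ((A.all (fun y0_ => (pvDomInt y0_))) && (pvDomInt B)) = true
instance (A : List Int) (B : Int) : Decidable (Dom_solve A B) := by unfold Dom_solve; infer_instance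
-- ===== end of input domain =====

-- B sorts once and walks the sorted input with a pointer, keeping only merged values in a
-- small ascending side list; A's break + post-loop check become unified in-loop returns and
-- the redundant curr == 1 branch disappears. A mutates its argument in place (heapify), B does
-- not — the equivalence proved here is about the RETURN value only.

-- ===== PORT A =====
-- heapq calls are ported by their library contract on the heap-as-multiset: heappop removes and
-- returns the minimum (first occurrence), A[0] reads the minimum, heapreplace pops the minimum
-- and pushes the new value.
def pyHeapMin? (h : List Int) : Option Int := PySem.List.min? h (fun x => x)

-- while len(A) > 1: … ; fuel = initial length (each iteration shrinks the heap by one).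
-- Returns the heap left behind and result.
def solveLoopA (fuel : Nat) (h : List Int) (res : Int) (B : Int) : List Int × Int :=
  match fuel with
  | 0 => (h, res)
  | fuel + 1 =>
    if h.length > 1 then
      match pyHeapMin? h with
      | none => (h, res)
      | some curr =>
        if curr > B then (h.erase curr, res)   -- break (curr already popped)
        else
          let x : Int := if curr == 1 then 0 else PySem.Int.floordiv curr 2
          let y : Int := if curr == 1 then 1 else curr - x
          let h1 := h.erase curr               -- heap after heappop
          match pyHeapMin? h1 with
          | none => (h1, res + x)              -- unreachable: len h1 ≥ 1
          | some m =>
            solveLoopA fuel (h1.erase m ++ [m + y]) (res + x) B   -- heapreplace(A, z)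
    else (h, res)

def solve (A : List Int) (B : Int) : Int :=
  let p := solveLoopA A.length A 0 B
  match pyHeapMin? p.1 with                    -- if A[0] <= B: result += A[0]//2
  | some m => if m ≤ B then p.2 + PySem.Int.floordiv m 2 else p.2
  | none => 0                                  -- Python raises IndexError here (A = [])

-- ===== PORT B =====
-- Source B's pop_min(): the pointer i over the sorted array xs is ported as the remaining suffix
-- 'rest'; returns (popped value, new rest, new ms); none = IndexError (both lists empty).
def popMinB (rest ms : List Int) : Option (Int × List Int × List Int) :=
  match ms with
  | z :: ms' =>
    match rest with
    | [] => some (z, [], ms')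
    | v :: rest' => if z ≤ v then some (z, rest, ms') else some (v, rest', z :: ms')
  | [] =>
    match rest with
    | [] => none
    | v :: rest' => some (v, rest', [])

-- Source B's linear insertion scan 'while j < len(ms) and ms[j] < z: j += 1; ms.insert(j, z)':
-- walk past the elements < z, insert z there.
def insertAsc (ms : List Int) (z : Int) : List Int :=
  match ms with
  | [] => [z]
  | a :: t => if a < z then a :: insertAsc t z else z :: a :: t

-- Source B's 'while True' loop; fuel = initial length (each iteration nets one element fewer).
def solveLoopB (fuel : Nat) (rest ms : List Int) (acc B : Int) : Int :=
  match fuel with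
  | 0 => acc
  | fuel + 1 =>
    match popMinB rest ms with
    | none => acc                              -- Python raises IndexError here (A = [])
    | some (curr, r1, m1) =>
      if curr > B then acc
      else
        let acc1 := acc + PySem.Int.floordiv curr 2
        if r1.isEmpty && m1.isEmpty then acc1
        else
          match popMinB r1 m1 with
          | none => acc1                       -- unreachable
          | some (m, r2, m2) =>
            solveLoopB fuel r2 (insertAsc m2 (m + curr - PySem.Int.floordiv curr 2)) acc1 B

def solve_alt (A : List Int) (B : Int) : Int :=
  solveLoopB A.length (PySem.List.sorted A (fun x => x) false) [] 0 B

-- ===== PRECONDITION & SPEC =====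
-- Pre_ excludes only the empty list, on which Python A raises IndexError at A[0].
def Pre_solve (A : List Int) (B : Int) : Prop := A ≠ []
instance (A : List Int) (B : Int) : Decidable (Pre_solve A B) := by unfold Pre_solve; infer_instance
def pvWitness_solve : List Int × Int := ([3, 1, 5, 2], 4)

def Spec_solve (A : List Int) (B : Int) (out : Int) : Prop := out = solve_alt A B
instance (A : List Int) (B : Int) (out : Int) : Decidable (Spec_solve A B out) := by unfold Spec_solve; infer_instance

-- ===== CLAIM (what is proved, stated in full; the proofs are below) =====
def Claim_equal_solve : Prop := ∀ (A : List Int) (B : Int), Dom_solve A B → Pre_solve A B → Spec_solve A B (solve A B)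

-- ===== LEMMAS AND PROOFS =====

-- A's post-loop step ('if A[0] <= B: result += A[0]//2'), factored out of 'solve'.
def finA (p : List Int × Int) (B : Int) : Int :=
  match pyHeapMin? p.1 with
  | some m => if m ≤ B then p.2 + PySem.Int.floordiv m 2 else p.2
  | none => 0

-- popMinB on two ascending lists returns a minimum of their union, the leftovers
-- (still ascending), and the union loses exactly that one occurrence.
theorem popMinB_spec (rest ms : List Int)
    (hr : rest.Pairwise (fun a b => a ≤ b)) (hm : ms.Pairwise (fun a b => a ≤ b))
    (hne : rest ++ ms ≠ []) :
    ∃ c r' m', popMinB rest ms = some (c, r', m') ∧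
      (rest ++ ms).Perm (c :: (r' ++ m')) ∧
      (∀ y ∈ rest ++ ms, c ≤ y) ∧
      r'.Pairwise (fun a b => a ≤ b) ∧ m'.Pairwise (fun a b => a ≤ b) := by
  match ms, rest with
  | [], [] => simp at hne
  | [], v :: rest' =>
    refine ⟨v, rest', [], rfl, by simp, ?_, hr.sublist (List.sublist_cons_self v rest'), by simp⟩
    intro y hy
    simp at hy
    rcases hy with h | h
    · omega
    · exact (List.pairwise_cons.mp hr).1 y h
  | z :: ms', [] =>
    refine ⟨z, [], ms', rfl, by simp, ?_, by simp, hm.sublist (List.sublist_cons_self z ms')⟩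
    intro y hy
    simp at hy
    rcases hy with h | h
    · omega
    · exact (List.pairwise_cons.mp hm).1 y h
  | z :: ms', v :: rest' =>
    by_cases hzv : z ≤ v
    · refine ⟨z, v :: rest', ms', by simp [popMinB, hzv], ?_, ?_, hr,
        hm.sublist (List.sublist_cons_self z ms')⟩
      · exact List.perm_middle
      · intro y hy
        simp at hy
        rcases hy with h | h | h | h
        · omega
        · exact le_trans hzv ((List.pairwise_cons.mp hr).1 y h)
        · omega
        · exact (List.pairwise_cons.mp hm).1 y h
    · refine ⟨v, rest', z :: ms', by simp [popMinB, hzv], by simp, ?_,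
        hr.sublist (List.sublist_cons_self v rest'), hm⟩
      intro y hy
      simp at hy
      rcases hy with h | h | h | h
      · omega
      · exact (List.pairwise_cons.mp hr).1 y h
      · omega
      · exact le_of_lt (lt_of_lt_of_le (lt_of_not_ge hzv) ((List.pairwise_cons.mp hm).1 y h))

-- insertAsc inserts one element …
theorem insertAsc_perm (ms : List Int) (z : Int) : (insertAsc ms z).Perm (z :: ms) := by
  induction ms with
  | nil => simp [insertAsc]
  | cons a t ih =>
    by_cases h : a < z
    · simpa [insertAsc, h] using ((ih.cons a).trans (List.Perm.swap z a t))
    · simp [insertAsc, h]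

-- … and keeps the list ascending.
theorem insertAsc_pairwise (ms : List Int) (z : Int) (hm : ms.Pairwise (fun a b => a ≤ b)) :
    (insertAsc ms z).Pairwise (fun a b => a ≤ b) := by
  induction ms with
  | nil => simp [insertAsc]
  | cons a t ih =>
    rcases List.pairwise_cons.mp hm with ⟨ha, ht⟩
    by_cases h : a < z
    · simp only [insertAsc, if_pos h]
      refine List.pairwise_cons.mpr ⟨?_, ih ht⟩
      intro y hy
      rcases List.mem_cons.mp ((insertAsc_perm t z).mem_iff.mp hy) with hy | hy
      · omega
      · exact ha y hy
    · simp only [insertAsc, if_neg h]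
      refine List.pairwise_cons.mpr ⟨?_, hm⟩
      intro y hy
      simp at hy
      rcases hy with hy | hy
      · omega
      · exact le_trans (by omega) (ha y hy)

-- pyHeapMin? returns THE minimum value: any member that is a lower bound equals it.
theorem pyHeapMin?_eq_of_min (h : List Int) (c : Int) (hc : c ∈ h) (hmin : ∀ y ∈ h, c ≤ y) :
    pyHeapMin? h = some c := by
  cases hm : pyHeapMin? h with
  | none =>
    have : h = [] := (PySem.List.min?_eq_none_iff h (fun x => x)).mp hm
    subst this; simp at hc
  | some m =>
    have h1 : m ≤ c := PySem.List.min?_isMin hm c hc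
    have h2 : c ≤ m := hmin m (PySem.List.min?_mem hm)
    rw [le_antisymm h1 h2]

-- removing one occurrence of a value c (l ~ c :: l') is the same, up to permutation,
-- as List.erase c.
theorem perm_erase_of_perm_cons (l l' : List Int) (c : Int) (hp : l.Perm (c :: l')) :
    l'.Perm (l.erase c) := by
  have hc : c ∈ l := hp.mem_iff.mpr (by simp)
  exact (hp.symm.trans (List.perm_cons_erase hc)).cons_inv

-- 1 // 2 = 0, so A's curr == 1 special case computes the same x and y as the general branch.
theorem x_one (curr : Int) :
    (if curr == 1 then (0 : Int) else PySem.Int.floordiv curr 2) = PySem.Int.floordiv curr 2 := by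
  by_cases h : curr = 1
  · subst h; decide
  · simp [h]

theorem y_one (curr : Int) :
    (if curr == 1 then (1 : Int) else curr - PySem.Int.floordiv curr 2)
      = curr - PySem.Int.floordiv curr 2 := by
  by_cases h : curr = 1
  · subst h; decide
  · simp [h]

-- the loop invariant: A's heap and B's (rest, ms) carry the same multiset, rest and ms
-- are ascending, and the heap is nonempty with at most 'fuel' elements.
theorem loop_agree (fuel : Nat) : ∀ (h rest ms : List Int) (res B : Int),
    rest.Pairwise (fun a b => a ≤ b) → ms.Pairwise (fun a b => a ≤ b) →
    (rest ++ ms).Perm h → h ≠ [] → h.length ≤ fuel →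
    finA (solveLoopA fuel h res B) B = solveLoopB fuel rest ms res B := by
  induction fuel with
  | zero =>
    intro h rest ms res B _ _ _ hne hlen
    exact absurd (List.length_eq_zero_iff.mp (Nat.le_zero.mp hlen)) hne
  | succ fuel ih =>
    intro h rest ms res B hr hm hp hne hlen
    have hcne : rest ++ ms ≠ [] := by
      intro hh
      exact hne ((hp.symm.trans (by rw [hh])).eq_nil)
    obtain ⟨c, r1, m1, hpop, hperm1, hmin1, hr1, hm1⟩ := popMinB_spec rest ms hr hm hcne
    have hcmemh : c ∈ h := hp.mem_iff.mp (hperm1.mem_iff.mpr (by simp))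
    have hcminh : ∀ y ∈ h, c ≤ y := fun y hy => hmin1 y (hp.mem_iff.mpr hy)
    have hminh : pyHeapMin? h = some c := pyHeapMin?_eq_of_min h c hcmemh hcminh
    have hlenc : (rest ++ ms).length = h.length := hp.length_eq
    have hperm1' : (r1 ++ m1).Perm (h.erase c) :=
      (perm_erase_of_perm_cons (rest ++ ms) (r1 ++ m1) c hperm1).trans (hp.erase c)
    have hlenr : (r1 ++ m1).length + 1 = h.length := by
      have h1 := hperm1.length_eq
      rw [hlenc, List.length_cons] at h1
      exact h1.symm
    by_cases hlen1 : h.length > 1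
    · -- at least two elements
      by_cases hcB : c > B
      · -- break on the A side, immediate return on the B side
        simp only [solveLoopB, hpop, if_pos hcB]
        simp only [solveLoopA, if_pos hlen1, hminh, if_pos hcB]
        have hene : h.erase c ≠ [] := by
          intro hh
          have h2 := congrArg List.length hh
          rw [List.length_erase_of_mem hcmemh] at h2
          simp at h2
          omega
        obtain ⟨m', hm'⟩ : ∃ m', pyHeapMin? (h.erase c) = some m' := by
          cases hq : pyHeapMin? (h.erase c) with
          | none => exact absurd ((PySem.List.min?_eq_none_iff _ _).mp hq) hene
          | some m' => exact ⟨m', rfl⟩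
        have hm'mem : m' ∈ h := List.mem_of_mem_erase (PySem.List.min?_mem hm')
        have hnb : ¬ m' ≤ B := fun hh => absurd (le_trans (hcminh m' hm'mem) hh) (not_le.mpr hcB)
        simp [finA, hm', hnb]
      · -- merge step on both sides
        have hne1p : r1 ++ m1 ≠ [] := by
          intro hh
          rw [hh] at hlenr
          simp at hlenr
          omega
        have hne1 : ¬ (r1.isEmpty && m1.isEmpty) = true := by
          intro hh
          simp [List.isEmpty_iff] at hh
          exact hne1p (by rw [hh.1, hh.2]; rfl)
        obtain ⟨m, r2, m2, hpop2, hperm2, hmin2, hr2, hm2⟩ := popMinB_spec r1 m1 hr1 hm1 hne1p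
        -- the A-side second minimum has the same value m
        have hmmem : m ∈ h.erase c := hperm1'.mem_iff.mp (hperm2.mem_iff.mpr (by simp))
        have hmmin : ∀ y ∈ h.erase c, m ≤ y := fun y hy => hmin2 y (hperm1'.mem_iff.mpr hy)
        have hminh1 : pyHeapMin? (h.erase c) = some m := pyHeapMin?_eq_of_min _ m hmmem hmmin
        simp only [solveLoopB, hpop, if_neg hcB, hne1, hpop2]
        simp only [solveLoopA, if_pos hlen1, hminh, if_neg hcB, hminh1, x_one, y_one]
        rw [show m + (c - PySem.Int.floordiv c 2) = m + c - PySem.Int.floordiv c 2 from by ring]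
        set z := m + c - PySem.Int.floordiv c 2 with hz
        have hznew : (r2 ++ insertAsc m2 z).Perm ((h.erase c).erase m ++ [z]) := by
          have h1 : (r2 ++ insertAsc m2 z).Perm (z :: (r2 ++ m2)) :=
            (List.Perm.append_left r2 (insertAsc_perm m2 z)).trans List.perm_middle
          have h2 : (r2 ++ m2).Perm ((h.erase c).erase m) :=
            (perm_erase_of_perm_cons (r1 ++ m1) (r2 ++ m2) m hperm2).trans (hperm1'.erase m)
          exact (h1.trans ((h2.cons z))).trans (List.perm_append_singleton z _).symm
        refine ih _ r2 _ (res + PySem.Int.floordiv c 2) B hr2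
          (insertAsc_pairwise m2 _ hm2) hznew ?_ ?_
        · intro hh
          have h2 := congrArg List.length hh
          rw [List.length_append, List.length_erase_of_mem hmmem,
            List.length_erase_of_mem hcmemh] at h2
          simp at h2
        · rw [List.length_append, List.length_erase_of_mem hmmem,
            List.length_erase_of_mem hcmemh]
          simp
          omega
    · -- exactly one element left: loop exits on the A side, final return on the B side
      have h1 : h.length = 1 := by
        have : h.length ≠ 0 := fun hh => hne (List.length_eq_zero_iff.mp hh)
        omega
      simp only [solveLoopA, if_neg hlen1]
      have hre : r1 = [] ∧ m1 = [] := by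
        have : (r1 ++ m1).length = 0 := by omega
        have h2 := List.length_eq_zero_iff.mp this
        rcases List.append_eq_nil_iff.mp h2 with ⟨ha, hb⟩
        exact ⟨ha, hb⟩
      simp only [solveLoopB, hpop, hre.1, hre.2]
      by_cases hcB : c > B
      · simp [finA, hminh, if_pos hcB, not_le.mpr hcB]
      · simp [finA, hminh, if_neg hcB, le_of_not_gt hcB]

-- ===== VERDICT (by name: the statement is the Claim_ definition above) =====
theorem solve_spec : Claim_equal_solve := by
  intro A B _ hpre
  show solve A B = solve_alt A B
  have hperm : (PySem.List.sorted A (fun x => x) false ++ []).Perm A := by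
    simpa using PySem.List.sorted_perm A (fun x => x) false
  have hpw : (PySem.List.sorted A (fun x => x) false).Pairwise (fun a b => a ≤ b) :=
    PySem.List.sorted_pairwise A (fun x => x)
  exact loop_agree A.length A (PySem.List.sorted A (fun x => x) false) [] 0 B
    hpw (by simp) hperm hpre (le_refl A.length)
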